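-- pv_equiv track=rewrite | github.com/Srisai-Sudharam/Daily_Learning_Data_Structures_and_Algorithms | 100days/Day - 5/Sum Of Zeroes.py | coverageOfMatrix
-- ===== SOURCE A (Python) =====
-- def coverageOfMatrix(a):
--     # Write your code here.
--     nc = len(a[0])
--     nr = len(a)
--
--     coverage = 0
--     for i in range(nr):
--         for j in range(nc):
--             if a[i][j] == 0:
--                 if i > 0:
--                     coverage += a[i-1][j]
--                 if j > 0:
--                     coverage += a[i][j-1]
--                 if i < nr -1:
--                     coverage += a[i+1][j]
--                 if j < nc -1:
--                     coverage += a[i][j+1]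
--     return coverage
-- ===== SOURCE B (Python) =====
-- def coverageOfMatrix(a):
--     # Edge-based decomposition: enumerate adjacent pairs directly with zip,
--     # no index arithmetic or boundary guards; each edge (x, y) contributes
--     # y when x == 0 and x when y == 0.
--     nc = len(a[0])
--     rows = [r[:nc] for r in a]
--     total = 0
--     for row in rows:                       # horizontal edges
--         for x, y in zip(row, row[1:]):
--             if x == 0:
--                 total += y
--             if y == 0:
--                 total += x
--     for r1, r2 in zip(rows, rows[1:]):     # vertical edges
--         for x, y in zip(r1, r2):
--             if x == 0:
--                 total += y
--             if y == 0:
--                 total += x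
--     return total
-- ===== Notes on version B (the rewrite author's own statement) =====
-- stated objective: alternative
-- what changed: B switches from A's cell-centric double index loop with four boundary guards to an edge-based enumeration: it zips each row with its shifted self and consecutive row pairs to visit every adjacent pair once, adding each endpoint when the other endpoint is zero; no index arithmetic or bounds checks remain.
import Mathlib
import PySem

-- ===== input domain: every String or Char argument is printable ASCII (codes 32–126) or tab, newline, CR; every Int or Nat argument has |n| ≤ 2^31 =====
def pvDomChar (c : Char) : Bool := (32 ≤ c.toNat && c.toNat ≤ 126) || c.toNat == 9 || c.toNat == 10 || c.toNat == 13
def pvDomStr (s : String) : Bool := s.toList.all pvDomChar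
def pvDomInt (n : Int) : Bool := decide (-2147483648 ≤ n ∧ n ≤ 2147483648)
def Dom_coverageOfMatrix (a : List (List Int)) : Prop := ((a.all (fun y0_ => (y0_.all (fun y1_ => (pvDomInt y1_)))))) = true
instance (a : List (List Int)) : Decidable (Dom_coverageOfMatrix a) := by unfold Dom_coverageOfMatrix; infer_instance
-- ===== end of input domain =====

-- B replaces A's cell-centric index loops with four boundary guards by an
-- edge-based enumeration: it zips each (truncated) row with its shifted self and
-- consecutive row pairs, adding each endpoint of an edge when the other is zero
-- (objective: alternative).

-- ===== PORT A =====
def coverageOfMatrix (a : List (List Int)) : Int :=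
  let nc : Int := (PySem.List.pyGetD a 0 []).length
  let nr : Int := a.length
  (PySem.List.pyRange 0 nr 1).foldl (fun coverage i =>
    (PySem.List.pyRange 0 nc 1).foldl (fun coverage j =>
      if PySem.List.pyGetD (PySem.List.pyGetD a i []) j 0 = 0 then
        let coverage := if 0 < i then coverage + PySem.List.pyGetD (PySem.List.pyGetD a (i-1) []) j 0 else coverage
        let coverage := if 0 < j then coverage + PySem.List.pyGetD (PySem.List.pyGetD a i []) (j-1) 0 else coverage
        let coverage := if i < nr - 1 then coverage + PySem.List.pyGetD (PySem.List.pyGetD a (i+1) []) j 0 else coverage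
        let coverage := if j < nc - 1 then coverage + PySem.List.pyGetD (PySem.List.pyGetD a i []) (j+1) 0 else coverage
        coverage
      else coverage) coverage) 0

-- ===== PORT B =====
-- Port of Source B: zip(row, row[1:]) is row.zip (slice row 1 none); row truncation r[:nc]
-- is slice r none nc; each 'for x, y in zip(…)' becomes a foldl over the zipped list.
def coverageOfMatrix_alt (a : List (List Int)) : Int :=
  let nc : Int := (PySem.List.pyGetD a 0 []).length
  let rows : List (List Int) := a.map (fun r => PySem.List.slice r none (some nc))
  let total : Int :=
    rows.foldl (fun total row =>
      (row.zip (PySem.List.slice row (some 1) none)).foldl (fun total p =>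
        let total := if p.1 = 0 then total + p.2 else total
        if p.2 = 0 then total + p.1 else total) total) 0
  (rows.zip (PySem.List.slice rows (some 1) none)).foldl (fun total p =>
    (p.1.zip p.2).foldl (fun total q =>
      let total := if q.1 = 0 then total + q.2 else total
      if q.2 = 0 then total + q.1 else total) total) total

-- ===== PRECONDITION & SPEC =====
-- Pre_ excludes exactly the inputs where the Python A raises IndexError: the empty
-- matrix (len(a[0])) and matrices with some row shorter than the first row.
def Pre_coverageOfMatrix (a : List (List Int)) : Prop :=
  a ≠ [] ∧ ∀ r ∈ a, (a.headD []).length ≤ r.length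
instance (a : List (List Int)) : Decidable (Pre_coverageOfMatrix a) := by
  unfold Pre_coverageOfMatrix; infer_instance
def pvWitness_coverageOfMatrix : List (List Int) := [[0, 1], [2, 3]]
def Spec_coverageOfMatrix (a : List (List Int)) (out : Int) : Prop := out = coverageOfMatrix_alt a
instance (a : List (List Int)) (out : Int) : Decidable (Spec_coverageOfMatrix a out) := by
  unfold Spec_coverageOfMatrix; infer_instance

-- ===== CLAIM (what is proved, stated in full; the proofs are below) =====
def Claim_equal_coverageOfMatrix : Prop := ∀ (a : List (List Int)), Dom_coverageOfMatrix a → Pre_coverageOfMatrix a → Spec_coverageOfMatrix a (coverageOfMatrix a)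

-- ===== LEMMAS AND PROOFS =====

-- cell accessor with default 0, nat indices
def pvg (a : List (List Int)) (i j : ℕ) : Int := (a.getD i []).getD j 0

-- contribution of one adjacency edge in B: each endpoint counts when the other is zero
def pvEdge (x y : Int) : Int := (if x = 0 then y else 0) + (if y = 0 then x else 0)

-- g a i j = a[i][j] with default 0, the cell accessor of A's port (Int indices)
def pvG (a : List (List Int)) (i j : Int) : Int :=
  PySem.List.pyGetD (PySem.List.pyGetD a i []) j 0

-- per-cell contribution of A: sum of the in-bounds neighbors of a zero cell
def pvTA (a : List (List Int)) (nr nc : ℕ) (i j : ℕ) : Int :=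
  if pvG a (i : Int) (j : Int) = 0 then
    (if 0 < (i : Int) then pvG a ((i : Int) - 1) (j : Int) else 0)
    + (if 0 < (j : Int) then pvG a (i : Int) ((j : Int) - 1) else 0)
    + (if (i : Int) < (nr : Int) - 1 then pvG a ((i : Int) + 1) (j : Int) else 0)
    + (if (j : Int) < (nc : Int) - 1 then pvG a (i : Int) ((j : Int) + 1) else 0)
  else 0

-- directional pieces of A (zero cell pulls from a neighbor), in nat-index form
def pvAU (a : List (List Int)) (i j : ℕ) : Int :=
  if pvg a i j = 0 ∧ 0 < i then pvg a (i - 1) j else 0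
def pvAL (a : List (List Int)) (i j : ℕ) : Int :=
  if pvg a i j = 0 ∧ 0 < j then pvg a i (j - 1) else 0
def pvAD (a : List (List Int)) (nr : ℕ) (i j : ℕ) : Int :=
  if pvg a i j = 0 ∧ i + 1 < nr then pvg a (i + 1) j else 0
def pvAR (a : List (List Int)) (nc : ℕ) (i j : ℕ) : Int :=
  if pvg a i j = 0 ∧ j + 1 < nc then pvg a i (j + 1) else 0

-- a foldl whose body adds a per-element term is the initial value plus a sum
lemma pv_foldl_body_eq {β : Type} (l : List β) (body : Int → β → Int) (t : β → Int)
    (h : ∀ acc x, body acc x = acc + t x) (init : Int) :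
    l.foldl body init = init + (l.map t).sum := by
  have hb : body = fun acc x => acc + t x := funext fun acc => funext fun x => h acc x
  rw [hb, PySem.List.foldl_add]

lemma pv_list_range_sum (n : ℕ) (f : ℕ → Int) :
    ((List.range n).map f).sum = ∑ k ∈ Finset.range n, f k := rfl

lemma pvG_natCast (a : List (List Int)) (i j : ℕ) : pvG a (i : Int) (j : Int) = pvg a i j := by
  simp [pvG, pvg]

lemma pvA_sum (a : List (List Int)) :
    coverageOfMatrix a =
      ∑ i ∈ Finset.range a.length, ∑ j ∈ Finset.range (PySem.List.pyGetD a 0 []).length,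
        pvTA a a.length (PySem.List.pyGetD a 0 []).length i j := by
  simp only [coverageOfMatrix]
  rw [PySem.List.pyRange_zero_nat a.length, List.foldl_map]
  rw [pv_foldl_body_eq _ _
      (fun k : ℕ => ∑ j ∈ Finset.range (PySem.List.pyGetD a 0 []).length,
        pvTA a a.length (PySem.List.pyGetD a 0 []).length k j) ?h 0]
  · rw [pv_list_range_sum, zero_add]
  · intro acc k
    rw [PySem.List.pyRange_zero_nat, List.foldl_map]
    rw [pv_foldl_body_eq _ _
        (fun m : ℕ => pvTA a a.length (PySem.List.pyGetD a 0 []).length k m) ?h2 acc]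
    · rw [pv_list_range_sum]
    · intro acc2 m
      simp only [pvTA, pvG]
      split_ifs <;> ring

-- A's per-cell term splits into the four directional pieces (nat-index form)
lemma pvTA_split (a : List (List Int)) (nr nc : ℕ) (i j : ℕ) :
    pvTA a nr nc i j = pvAU a i j + pvAL a i j + pvAD a nr i j + pvAR a nc i j := by
  have eU : (if (0:Int) < (i:Int) then pvG a ((i:Int) - 1) (j:Int) else 0)
      = (if 0 < i then pvg a (i - 1) j else 0) := by
    cases i with
    | zero => simp
    | succ n =>
      rw [if_pos (by positivity), if_pos (Nat.succ_pos n)]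
      have h1 : ((n + 1 : ℕ) : Int) - 1 = (n : Int) := by push_cast; ring
      rw [h1, Nat.add_sub_cancel, pvG_natCast]
  have eL : (if (0:Int) < (j:Int) then pvG a (i:Int) ((j:Int) - 1) else 0)
      = (if 0 < j then pvg a i (j - 1) else 0) := by
    cases j with
    | zero => simp
    | succ n =>
      rw [if_pos (by positivity), if_pos (Nat.succ_pos n)]
      have h1 : ((n + 1 : ℕ) : Int) - 1 = (n : Int) := by push_cast; ring
      rw [h1, Nat.add_sub_cancel, pvG_natCast]
  have eD : (if (i:Int) < (nr:Int) - 1 then pvG a ((i:Int) + 1) (j:Int) else 0)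
      = (if i + 1 < nr then pvg a (i + 1) j else 0) := by
    have hc : ((i:Int) < (nr:Int) - 1) ↔ i + 1 < nr := by omega
    have hg : pvG a ((i:Int) + 1) (j:Int) = pvg a (i + 1) j := by
      have h := pvG_natCast a (i + 1) j; push_cast at h; exact h
    simp [hc, hg]
  have eR : (if (j:Int) < (nc:Int) - 1 then pvG a (i:Int) ((j:Int) + 1) else 0)
      = (if j + 1 < nc then pvg a i (j + 1) else 0) := by
    have hc : ((j:Int) < (nc:Int) - 1) ↔ j + 1 < nc := by omega
    have hg : pvG a (i:Int) ((j:Int) + 1) = pvg a i (j + 1) := by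
      have h := pvG_natCast a i (j + 1); push_cast at h; exact h
    simp [hc, hg]
  simp only [pvTA, pvAU, pvAL, pvAD, pvAR, pvG_natCast]
  by_cases h0 : pvg a i j = 0
  · rw [if_pos h0, eU, eL, eD, eR]
    simp only [h0, true_and]
  · simp [h0]

-- (l.map f).sum as an indexed sum
lemma pv_map_sum {α : Type} (d : α) (f : α → Int) (l : List α) :
    (l.map f).sum = ∑ i ∈ Finset.range l.length, f (l.getD i d) := by
  induction l with
  | nil => simp
  | cons x t ih =>
    simp [Finset.sum_range_succ', ih]
    ring

-- zip of a list with its own tail enumerates adjacent pairs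
lemma pv_zip_tail_sum {α : Type} (d : α) (f : α → α → Int) (l : List α) :
    ((l.zip l.tail).map (fun p => f p.1 p.2)).sum
      = ∑ j ∈ Finset.range (l.length - 1), f (l.getD j d) (l.getD (j + 1) d) := by
  induction l with
  | nil => simp
  | cons x t ih =>
    cases t with
    | nil => simp
    | cons y t' =>
      simp only [List.tail_cons] at ih ⊢
      simp only [List.zip_cons_cons, List.map_cons, List.sum_cons]
      rw [ih]
      simp [Finset.sum_range_succ']
      ring

-- zip of two lists enumerates index-aligned pairs
lemma pv_zip_sum {α β : Type} (d1 : α) (d2 : β) (f : α → β → Int) (l1 : List α) (l2 : List β) :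
    ((l1.zip l2).map (fun p => f p.1 p.2)).sum
      = ∑ j ∈ Finset.range (min l1.length l2.length), f (l1.getD j d1) (l2.getD j d2) := by
  induction l1 generalizing l2 with
  | nil => simp
  | cons x t ih =>
    cases l2 with
    | nil => simp
    | cons y t2 =>
      simp only [List.zip_cons_cons, List.map_cons, List.sum_cons]
      rw [ih]
      have : min (x :: t).length (y :: t2).length = min t.length t2.length + 1 := by
        simp [Nat.succ_min_succ]
      rw [this, Finset.sum_range_succ']
      simp
      ring

-- shift a sum over range n with a vanishing first term down to range (n-1)
lemma pv_shift_sum' (n : ℕ) (F G : ℕ → Int) (hF0 : F 0 = 0)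
    (hFG : ∀ k, k + 1 < n → F (k + 1) = G k) :
    ∑ k ∈ Finset.range n, F k = ∑ k ∈ Finset.range (n - 1), G k := by
  cases n with
  | zero => simp
  | succ m =>
    rw [Finset.sum_range_succ', hF0, add_zero]
    exact Finset.sum_congr (by simp) fun k hk =>
      hFG k (Nat.succ_lt_succ (Finset.mem_range.mp (by simpa using hk)))

-- drop a guard j+1 < n from a sum over range n, shrinking it to range (n-1)
lemma pv_sum_guard (n : ℕ) (h : ℕ → Int) :
    ∑ j ∈ Finset.range n, (if j + 1 < n then h j else 0)
      = ∑ j ∈ Finset.range (n - 1), h j := by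
  cases n with
  | zero => simp
  | succ m =>
    rw [Finset.sum_range_succ, if_neg (by omega), add_zero]
    exact Finset.sum_congr (by simp) fun j hj =>
      if_pos (by have := Finset.mem_range.mp (by simpa using hj); omega)

-- horizontal: left+right pulls of a row equal its adjacent-pair edge sum
lemma pvH (a : List (List Int)) (nc : ℕ) (i : ℕ) :
    ∑ j ∈ Finset.range nc, (pvAL a i j + pvAR a nc i j)
      = ∑ j ∈ Finset.range (nc - 1), pvEdge (pvg a i j) (pvg a i (j + 1)) := by
  rw [Finset.sum_add_distrib]
  have hL : ∑ j ∈ Finset.range nc, pvAL a i j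
      = ∑ j ∈ Finset.range (nc - 1), (if pvg a i (j + 1) = 0 then pvg a i j else 0) := by
    refine pv_shift_sum' nc _ _ (by simp [pvAL]) fun k hk => ?_
    simp only [pvAL, Nat.add_sub_cancel]
    refine if_congr ⟨fun ⟨h, _⟩ => h, fun h => ⟨h, by omega⟩⟩ rfl rfl
  have hR : ∑ j ∈ Finset.range nc, pvAR a nc i j
      = ∑ j ∈ Finset.range (nc - 1), (if pvg a i j = 0 then pvg a i (j + 1) else 0) := by
    rw [← pv_sum_guard nc]
    refine Finset.sum_congr rfl fun j _ => ?_
    simp only [pvAR]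
    by_cases h : j + 1 < nc <;> by_cases h0 : pvg a i j = 0 <;> simp [h, h0]
  rw [hL, hR, ← Finset.sum_add_distrib]
  exact Finset.sum_congr rfl fun j _ => by simp [pvEdge]; ring

-- vertical: up+down pulls of a column equal its adjacent-pair edge sum
lemma pvV (a : List (List Int)) (nr : ℕ) (j : ℕ) :
    ∑ i ∈ Finset.range nr, (pvAU a i j + pvAD a nr i j)
      = ∑ i ∈ Finset.range (nr - 1), pvEdge (pvg a i j) (pvg a (i + 1) j) := by
  rw [Finset.sum_add_distrib]
  have hU : ∑ i ∈ Finset.range nr, pvAU a i j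
      = ∑ i ∈ Finset.range (nr - 1), (if pvg a (i + 1) j = 0 then pvg a i j else 0) := by
    refine pv_shift_sum' nr _ _ (by simp [pvAU]) fun k hk => ?_
    simp only [pvAU, Nat.add_sub_cancel]
    refine if_congr ⟨fun ⟨h, _⟩ => h, fun h => ⟨h, by omega⟩⟩ rfl rfl
  have hD : ∑ i ∈ Finset.range nr, pvAD a nr i j
      = ∑ i ∈ Finset.range (nr - 1), (if pvg a i j = 0 then pvg a (i + 1) j else 0) := by
    rw [← pv_sum_guard nr]
    refine Finset.sum_congr rfl fun i _ => ?_
    simp only [pvAD]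
    by_cases h : i + 1 < nr <;> by_cases h0 : pvg a i j = 0 <;> simp [h, h0]
  rw [hU, hD, ← Finset.sum_add_distrib]
  exact Finset.sum_congr rfl fun i _ => by simp [pvEdge]; ring

-- B as a double sum of edge contributions (uses Pre_: rows truncate to exactly nc)
lemma pvB_sum (a : List (List Int)) (hpre : Pre_coverageOfMatrix a) :
    coverageOfMatrix_alt a =
      (∑ i ∈ Finset.range a.length,
        ∑ j ∈ Finset.range ((PySem.List.pyGetD a 0 []).length - 1),
          pvEdge (pvg a i j) (pvg a i (j + 1)))
      + ∑ i ∈ Finset.range (a.length - 1),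
          ∑ j ∈ Finset.range (PySem.List.pyGetD a 0 []).length,
            pvEdge (pvg a i j) (pvg a (i + 1) j) := by
  obtain ⟨hne, hlen⟩ := hpre
  have hbody : ∀ (acc : Int) (p : Int × Int),
      (let t := if p.1 = 0 then acc + p.2 else acc
       if p.2 = 0 then t + p.1 else t) = acc + pvEdge p.1 p.2 := by
    intro acc p; simp only [pvEdge]; split_ifs <;> ring
  set nc : ℕ := (PySem.List.pyGetD a 0 []).length with hnc
  -- Pre_ facts in terms of nc
  have hnc0 : a.getD 0 [] = a.headD [] := by cases a <;> simp
  have hlen' : ∀ r ∈ a, nc ≤ r.length := by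
    intro r hr
    have h := hlen r hr
    have h2 : nc = (a.headD []).length := by
      rw [hnc, PySem.List.pyGetD_zero, hnc0]
    omega
  have hrow : ∀ i, i < a.length →
      (a.map (fun r => r.take nc)).getD i [] = (a.getD i []).take nc := by
    intro i hi
    rw [List.getD_eq_getElem _ _ (by simpa using hi), List.getElem_map,
        List.getD_eq_getElem _ _ hi]
  have hmem : ∀ i, i < a.length → a.getD i [] ∈ a := by
    intro i hi; rw [List.getD_eq_getElem _ _ hi]; exact List.getElem_mem hi
  have hlenrow : ∀ i, i < a.length → ((a.getD i []).take nc).length = nc := by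
    intro i hi
    rw [List.length_take]
    exact min_eq_left (hlen' _ (hmem i hi))
  have hentry : ∀ i, i < a.length → ∀ j, j < nc →
      ((a.getD i []).take nc).getD j 0 = pvg a i j := by
    intro i hi j hj
    simp only [pvg, List.getD, List.getElem?_take]
    rw [if_pos hj]
  -- unfold the port
  simp only [coverageOfMatrix_alt, PySem.List.slice_from_one, PySem.List.slice_to_natCast, ← hnc]
  rw [pv_foldl_body_eq (a.map fun r => r.take nc) _
      (fun row => ((row.zip row.tail).map (fun p => pvEdge p.1 p.2)).sum) ?h1 0]
  case h1 =>
    intro acc row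
    rw [pv_foldl_body_eq _ _ (fun p : Int × Int => pvEdge p.1 p.2) hbody acc]
  rw [pv_foldl_body_eq ((a.map fun r => r.take nc).zip (a.map fun r => r.take nc).tail) _
      (fun pr : List Int × List Int => ((pr.1.zip pr.2).map (fun q => pvEdge q.1 q.2)).sum) ?h2 _]
  case h2 =>
    intro acc pr
    rw [pv_foldl_body_eq _ _ (fun q : Int × Int => pvEdge q.1 q.2) hbody acc]
  have hzt : (((a.map fun r => r.take nc).zip (a.map fun r => r.take nc).tail).map
      (fun pr : List Int × List Int => ((pr.1.zip pr.2).map (fun q => pvEdge q.1 q.2)).sum)).sum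
      = ∑ i ∈ Finset.range ((a.map fun r => r.take nc).length - 1),
          ((((a.map fun r => r.take nc).getD i []).zip
            ((a.map fun r => r.take nc).getD (i + 1) [])).map (fun q => pvEdge q.1 q.2)).sum :=
    pv_zip_tail_sum ([] : List Int)
      (fun r1 r2 => ((r1.zip r2).map (fun q => pvEdge q.1 q.2)).sum) _
  rw [zero_add, pv_map_sum ([] : List Int), hzt]
  simp only [List.length_map]
  congr 1
  · refine Finset.sum_congr rfl fun i hi => ?_
    have hi' := Finset.mem_range.mp hi
    rw [hrow i hi', pv_zip_tail_sum (0 : Int), hlenrow i hi']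
    refine Finset.sum_congr rfl fun j hj => ?_
    have hj' := Finset.mem_range.mp hj
    rw [hentry i hi' j (by omega), hentry i hi' (j + 1) (by omega)]
  · refine Finset.sum_congr rfl fun i hi => ?_
    have hi' := Finset.mem_range.mp hi
    rw [hrow i (by omega), hrow (i + 1) (by omega), pv_zip_sum (0 : Int) (0 : Int),
        hlenrow i (by omega), hlenrow (i + 1) (by omega), Nat.min_self]
    refine Finset.sum_congr rfl fun j hj => ?_
    have hj' := Finset.mem_range.mp hj
    rw [hentry i (by omega) j hj', hentry (i + 1) (by omega) j hj']

-- ===== VERDICT (by name: the statement is the Claim_ definition above) =====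
theorem coverageOfMatrix_spec : Claim_equal_coverageOfMatrix := by
  intro a _ hpre
  show coverageOfMatrix a = coverageOfMatrix_alt a
  rw [pvA_sum, pvB_sum a hpre]
  set nc := (PySem.List.pyGetD a 0 []).length
  set nr := a.length
  calc ∑ i ∈ Finset.range nr, ∑ j ∈ Finset.range nc, pvTA a nr nc i j
      = ∑ i ∈ Finset.range nr, ∑ j ∈ Finset.range nc,
          (pvAU a i j + pvAL a i j + pvAD a nr i j + pvAR a nc i j) := by
        exact Finset.sum_congr rfl fun i _ => Finset.sum_congr rfl fun j _ => pvTA_split ..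
    _ = (∑ i ∈ Finset.range nr, ∑ j ∈ Finset.range nc, (pvAL a i j + pvAR a nc i j))
        + ∑ j ∈ Finset.range nc, ∑ i ∈ Finset.range nr, (pvAU a i j + pvAD a nr i j) := by
        rw [Finset.sum_comm (s := Finset.range nc)]
        simp only [← Finset.sum_add_distrib]
        exact Finset.sum_congr rfl fun i _ => Finset.sum_congr rfl fun j _ => by ring
    _ = _ := by
        rw [Finset.sum_congr rfl fun i (_ : i ∈ Finset.range nr) => pvH a nc i,
            Finset.sum_congr rfl fun j (_ : j ∈ Finset.range nc) => pvV a nr j]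
        congr 1
        exact Finset.sum_comm
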